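-- pv_equiv track=rewrite | github.com/Andrew-Mereuta/NetworkingFinal | main.py | calculate_nodes_by_weight
-- ===== SOURCE A (Python) =====
-- def calculate_nodes_by_weight(hyperlinks, nodes):
--     weight_by_hyperlink = {}
--     for hyperlink in hyperlinks:
--         if tuple(sorted(hyperlink)) in weight_by_hyperlink:
--             weight_by_hyperlink[tuple(sorted(hyperlink))] += (len(hyperlink) - 1)
--         else:
--             weight_by_hyperlink[tuple(sorted(hyperlink))] = 1
--
--     node_strength = {node: 0 for node in nodes}
--     for node in nodes:
--         for hyperlink, weight in weight_by_hyperlink.items():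
--             if node in hyperlink:
--                 node_strength[node] += weight
--     sorted_grouped = {}
--     degrees = dict(sorted(node_strength.items(), key=lambda item: item[1], reverse=True))
--     for node, strength in sorted(degrees.items()):
--         if strength in sorted_grouped:
--             sorted_grouped[strength].append(node)
--         else:
--             sorted_grouped[strength] = [node]
--     return dict(sorted(sorted_grouped.items(), key=lambda x: x[0], reverse=True))
-- ===== SOURCE B (Python) =====
-- def calculate_nodes_by_weight(hyperlinks, nodes):
--     # Inverted pass: each distinct (sorted) hyperlink distributes its closed-form
--     # weight 1 + (c-1)*(len-1) to its member nodes; scale by multiplicity in `nodes`;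
--     # emit groups directly per distinct strength, descending.
--     keys = [tuple(sorted(h)) for h in hyperlinks]
--     counts = {}
--     for k in keys:
--         counts[k] = counts.get(k, 0) + 1
--     base = {}
--     for k, c in counts.items():
--         w = 1 + (c - 1) * (len(k) - 1)
--         for node in set(k):
--             base[node] = base.get(node, 0) + w
--     mult = {}
--     for n in nodes:
--         mult[n] = mult.get(n, 0) + 1
--     strength = {n: m * base.get(n, 0) for n, m in mult.items()}
--     return {s: sorted(n for n in strength if strength[n] == s)
--             for s in sorted(set(strength.values()), reverse=True)}
-- ===== Notes on version B (the rewrite author's own statement) =====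
-- stated objective: faster
-- what changed: Instead of scanning every hyperlink key for every node occurrence and grouping through two staged dicts, B counts equal sorted hyperlinks once, distributes each key's closed-form weight 1+(c-1)*(len-1) to its member nodes in a single inverted pass, scales by each node's multiplicity in `nodes`, and emits the result directly as one group per distinct strength (distinct strengths sorted descending, member nodes sorted ascending) with no grouping dict at all.
import Mathlib
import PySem

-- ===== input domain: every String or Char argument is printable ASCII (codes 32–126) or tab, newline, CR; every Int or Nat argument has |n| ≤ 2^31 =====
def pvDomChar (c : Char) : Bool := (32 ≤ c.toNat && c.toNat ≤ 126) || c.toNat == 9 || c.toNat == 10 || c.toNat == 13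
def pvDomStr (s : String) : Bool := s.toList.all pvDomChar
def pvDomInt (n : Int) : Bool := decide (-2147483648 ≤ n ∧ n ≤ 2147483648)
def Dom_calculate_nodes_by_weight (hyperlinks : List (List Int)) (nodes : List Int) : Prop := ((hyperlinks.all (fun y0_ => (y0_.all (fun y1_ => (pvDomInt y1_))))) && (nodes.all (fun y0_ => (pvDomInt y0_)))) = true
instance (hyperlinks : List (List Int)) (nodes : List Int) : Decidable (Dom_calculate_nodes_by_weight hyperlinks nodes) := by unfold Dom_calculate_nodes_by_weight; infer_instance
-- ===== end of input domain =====

-- B replaces A's per-node scan over all hyperlink keys and its two-stage dict grouping by one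
-- inverted pass distributing each key's closed-form weight, emitting one group per distinct
-- strength directly (objective: faster).

-- ===== PORT A =====
def calculate_nodes_by_weight (hyperlinks : List (List Int)) (nodes : List Int) : List (Int × List Int) :=
  let wbh : PySem.Dict (List Int) Int := hyperlinks.foldl (fun d h =>
    match d.get? (PySem.List.sorted h (fun x => x) false) with
    | some w => d.insert (PySem.List.sorted h (fun x => x) false) (w + ((h.length : Int) - 1))
    | none => d.insert (PySem.List.sorted h (fun x => x) false) 1) PySem.Dict.empty
  let ns0 : PySem.Dict Int Int := nodes.foldl (fun d n => d.insert n 0) PySem.Dict.empty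
  let ns : PySem.Dict Int Int := nodes.foldl (fun d n =>
    wbh.items.foldl (fun d p => if n ∈ p.1 then d.insert n (d.getD n 0 + p.2) else d) d) ns0
  let degrees : List (Int × Int) := PySem.List.sorted ns.items (fun p => p.2) true
  let grouped : PySem.Dict Int (List Int) :=
    (PySem.List.sorted2 degrees (fun p => p.1) (fun p => p.2) false).foldl (fun g p =>
      match g.get? p.2 with
      | some l => g.insert p.2 (l ++ [p.1])
      | none => g.insert p.2 [p.1]) PySem.Dict.empty
  PySem.List.sorted grouped.items (fun p => p.1) true

-- ===== PORT B =====
def calculate_nodes_by_weight_alt (hyperlinks : List (List Int)) (nodes : List Int) : List (Int × List Int) :=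
  let keys : List (List Int) := hyperlinks.map (fun h => PySem.List.sorted h (fun x => x) false)
  let counts : PySem.Dict (List Int) Int := keys.foldl (fun d k => d.insert k (d.getD k 0 + 1)) PySem.Dict.empty
  let base : PySem.Dict Int Int := counts.items.foldl (fun b p =>
    (PySem.Set.ofList p.1).foldl (fun b n =>
      b.insert n (b.getD n 0 + (1 + (p.2 - 1) * ((p.1.length : Int) - 1)))) b) PySem.Dict.empty
  let mult : PySem.Dict Int Int := nodes.foldl (fun d n => d.insert n (d.getD n 0 + 1)) PySem.Dict.empty
  let strength : List (Int × Int) := mult.items.map (fun p => (p.1, p.2 * base.getD p.1 0))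
  (PySem.List.sorted (PySem.Set.ofList (strength.map (fun p => p.2))) (fun s => s) true).map
    (fun s => (s, PySem.List.sorted ((strength.filter (fun p => p.2 == s)).map (fun p => p.1)) (fun n => n) false))

-- ===== PRECONDITION & SPEC =====
def Spec_calculate_nodes_by_weight (hyperlinks : List (List Int)) (nodes : List Int) (out : List (Int × List Int)) : Prop := out = calculate_nodes_by_weight_alt hyperlinks nodes
instance (hyperlinks : List (List Int)) (nodes : List Int) (out : List (Int × List Int)) : Decidable (Spec_calculate_nodes_by_weight hyperlinks nodes out) := by unfold Spec_calculate_nodes_by_weight; infer_instance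

-- ===== CLAIM (what is proved, stated in full; the proofs are below) =====
def Claim_equal_calculate_nodes_by_weight : Prop := ∀ (hyperlinks : List (List Int)) (nodes : List Int), Dom_calculate_nodes_by_weight hyperlinks nodes → Spec_calculate_nodes_by_weight hyperlinks nodes (calculate_nodes_by_weight hyperlinks nodes)

-- ===== LEMMAS AND PROOFS =====

-- the weight a key of count c and size L ends up with: 1 + (c-1)(L-1)
def pvg (k : List Int) (c : Int) : Int := 1 + (c - 1) * ((k.length : Int) - 1)
-- the total weight the keys `w` containing n contribute to n
def pvS (w : List (List Int × Int)) (n : Int) : Int :=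
  ((w.filter (fun p => decide (n ∈ p.1))).map (fun p => p.2)).sum

lemma mapVal_get? {κ ν : Type} [BEq κ] [LawfulBEq κ] (g : κ → ν → ν) (l : List (κ × ν)) (k : κ) :
    (PySem.Dict.mk (l.map (fun p => (p.1, g p.1 p.2)))).get? k
      = ((PySem.Dict.mk l).get? k).map (g k) := by
  induction l with
  | nil => simp [PySem.Dict.get?]
  | cons p t ih =>
    obtain ⟨k0, v0⟩ := p
    simp only [List.map_cons, PySem.Dict.get?_mk_cons]
    by_cases h : k0 = k
    · subst h; simp
    · simp [h, ih]

lemma mapVal_keys {κ ν : Type} [BEq κ] (g : κ → ν → ν) (l : List (κ × ν)) :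
    (PySem.Dict.mk (l.map (fun p => (p.1, g p.1 p.2)))).keys = (PySem.Dict.mk l).keys := by
  simp [PySem.Dict.keys, List.map_map, Function.comp]

lemma mapVal_contains {κ ν : Type} [BEq κ] [LawfulBEq κ] [DecidableEq κ] (g : κ → ν → ν) (l : List (κ × ν)) (k : κ) :
    (PySem.Dict.mk (l.map (fun p => (p.1, g p.1 p.2)))).contains k = (PySem.Dict.mk l).contains k := by
  rw [PySem.Dict.contains_eq_decide_mem_keys, PySem.Dict.contains_eq_decide_mem_keys, mapVal_keys]

lemma mapVal_insert {κ ν : Type} [BEq κ] [LawfulBEq κ] [DecidableEq κ] (g : κ → ν → ν) (d : PySem.Dict κ ν) (k : κ) (v : ν) :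
    (PySem.Dict.mk (d.items.map (fun p => (p.1, g p.1 p.2)))).insert k (g k v)
      = PySem.Dict.mk ((d.insert k v).items.map (fun p => (p.1, g p.1 p.2))) := by
  by_cases hc : d.contains k = true
  · have hc' : (PySem.Dict.mk (d.items.map (fun p => (p.1, g p.1 p.2)))).contains k = true := by
      rw [mapVal_contains]; exact hc
    apply PySem.Dict.ext
    rw [PySem.Dict.items_insert_of_contains _ _ hc']
    show _ = ((d.insert k v).items.map (fun p => (p.1, g p.1 p.2)))
    rw [PySem.Dict.items_insert_of_contains _ _ hc]
    simp only [List.map_map]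
    apply List.map_congr_left
    intro p hp
    by_cases h : p.1 = k
    · simp [Function.comp, h]
    · simp [Function.comp, h]
  · have hc2 : d.contains k = false := by simpa using hc
    have hc' : (PySem.Dict.mk (d.items.map (fun p => (p.1, g p.1 p.2)))).contains k = false := by
      rw [mapVal_contains]; exact hc2
    apply PySem.Dict.ext
    rw [PySem.Dict.items_insert_of_not_contains _ _ hc']
    show _ = ((d.insert k v).items.map (fun p => (p.1, g p.1 p.2)))
    rw [PySem.Dict.items_insert_of_not_contains _ _ hc2]
    simp

-- A's weight_by_hyperlink is B's counter with each count c replaced by 1+(c-1)(L-1)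
lemma wbh_eq (hs : List (List Int)) (d : PySem.Dict (List Int) Int) :
    hs.foldl (fun d h =>
      match d.get? (PySem.List.sorted h (fun x => x) false) with
      | some w => d.insert (PySem.List.sorted h (fun x => x) false) (w + ((h.length : Int) - 1))
      | none => d.insert (PySem.List.sorted h (fun x => x) false) 1)
      (PySem.Dict.mk (d.items.map (fun p => (p.1, pvg p.1 p.2))))
    = PySem.Dict.mk ((hs.foldl (fun d h =>
        d.insert (PySem.List.sorted h (fun x => x) false)
          (d.getD (PySem.List.sorted h (fun x => x) false) 0 + 1)) d).items.map
        (fun p => (p.1, pvg p.1 p.2))) := by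
  induction hs generalizing d with
  | nil => simp
  | cons h t ih =>
    simp only [List.foldl_cons]
    have hget := mapVal_get? pvg d.items (PySem.List.sorted h (fun x => x) false)
    have hlen : (PySem.List.sorted h (fun x => x) false).length = h.length :=
      PySem.List.length_sorted h (fun x => x) false
    cases hk : d.get? (PySem.List.sorted h (fun x => x) false) with
    | none =>
      rw [hget, hk]
      simp only [Option.map_none]
      have h1 : pvg (PySem.List.sorted h (fun x => x) false) 1 = 1 := by simp [pvg]
      have hD : d.getD (PySem.List.sorted h (fun x => x) false) 0 = 0 :=
        PySem.Dict.getD_of_get?_eq_none d 0 hk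
      have hins := mapVal_insert pvg d (PySem.List.sorted h (fun x => x) false) 1
      rw [h1] at hins
      rw [hins, ih, hD]
      norm_num
    | some c =>
      rw [hget, hk]
      simp only [Option.map_some]
      have hval : pvg (PySem.List.sorted h (fun x => x) false) c + ((h.length : Int) - 1)
          = pvg (PySem.List.sorted h (fun x => x) false) (c + 1) := by
        simp only [pvg, hlen]; ring
      have hD : d.getD (PySem.List.sorted h (fun x => x) false) 0 = c :=
        PySem.Dict.getD_of_get?_eq_some d 0 hk
      have hins := mapVal_insert pvg d (PySem.List.sorted h (fun x => x) false) (c + 1)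
      rw [← hval] at hins
      rw [hins, ih, hD]

lemma ns0_getD (l : List Int) (d : PySem.Dict Int Int) (h : ∀ v, d.getD v 0 = 0) (v : Int) :
    (l.foldl (fun d n => d.insert n (0 : Int)) d).getD v 0 = 0 := by
  induction l generalizing d with
  | nil => simpa using h v
  | cons n t ih =>
    simp only [List.foldl_cons]
    exact ih _ (fun u => by rw [PySem.Dict.getD_insert]; split <;> simp [h u])

lemma insert_getD_self (d : PySem.Dict Int Int) (n : Int) (hnd : d.keys.Nodup)
    (hc : d.contains n = true) : d.insert n (d.getD n 0) = d := by
  apply PySem.Dict.ext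
  rw [PySem.Dict.items_insert_of_contains _ _ hc]
  have : ∀ p ∈ d.items, (if (p.1 == n) = true then (n, d.getD n 0) else p) = p := by
    intro p hp
    split
    · next hb =>
      have hpn : p.1 = n := by simpa using hb
      have hv : d.getD n 0 = p.2 := by
        apply PySem.Dict.getD_of_mem_items d _ hnd
        rw [← hpn]; exact hp
      rw [hv, ← hpn]
    · rfl
  calc List.map (fun p => if (p.1 == n) = true then (n, d.getD n 0) else p) d.items
      = List.map id d.items := List.map_congr_left (by simpa using this)
    _ = d.items := List.map_id d.items

lemma inner_eq (l : List (List Int × Int)) (d : PySem.Dict Int Int) (n : Int)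
    (hnd : d.keys.Nodup) (hc : d.contains n = true) :
    l.foldl (fun d p => if n ∈ p.1 then d.insert n (d.getD n 0 + p.2) else d) d
      = d.insert n (d.getD n 0 + pvS l n) := by
  induction l generalizing d with
  | nil =>
    simp only [List.foldl_nil, pvS, List.filter_nil, List.map_nil, List.sum_nil, add_zero]
    exact (insert_getD_self d n hnd hc).symm
  | cons p t ih =>
    simp only [List.foldl_cons]
    by_cases hm : n ∈ p.1
    · simp only [hm, if_pos]
      rw [ih (d.insert n (d.getD n 0 + p.2))
            (PySem.Dict.nodup_keys_insert d n _ hnd)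
            (by rw [PySem.Dict.contains_insert]; simp)]
      rw [PySem.Dict.getD_insert_self, PySem.Dict.insert_insert_self]
      have : pvS (p :: t) n = p.2 + pvS t n := by
        simp [pvS, hm]
      rw [this]; ring_nf
    · simp only [hm, if_neg, not_false_iff]
      rw [ih d hnd hc]
      have : pvS (p :: t) n = pvS t n := by
        simp [pvS, hm]
      rw [this]

lemma outer_char (ns : List Int) (w : List (List Int × Int)) (d : PySem.Dict Int Int)
    (hnd : d.keys.Nodup) (hc : ∀ v ∈ ns, d.contains v = true) :
    (ns.foldl (fun d n =>
        w.foldl (fun d p => if n ∈ p.1 then d.insert n (d.getD n 0 + p.2) else d) d) d).keys = d.keys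
    ∧ ∀ v, (ns.foldl (fun d n =>
        w.foldl (fun d p => if n ∈ p.1 then d.insert n (d.getD n 0 + p.2) else d) d) d).getD v 0
        = d.getD v 0 + (ns.count v : Int) * pvS w v := by
  induction ns generalizing d with
  | nil => simp
  | cons n t ih =>
    simp only [List.foldl_cons]
    rw [inner_eq w d n hnd (hc n (by simp))]
    have hcn := hc n (by simp)
    have hnd' := PySem.Dict.nodup_keys_insert d n (d.getD n 0 + pvS w n) hnd
    have hc' : ∀ v ∈ t, (d.insert n (d.getD n 0 + pvS w n)).contains v = true := by
      intro v hv
      rw [PySem.Dict.contains_insert]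
      simp [hc v (by simp [hv])]
    obtain ⟨ihk, ihg⟩ := ih (d.insert n (d.getD n 0 + pvS w n)) hnd' hc'
    refine ⟨ihk.trans (PySem.Dict.keys_insert_of_contains d _ hcn), ?_⟩
    intro v
    rw [ihg v, PySem.Dict.getD_insert]
    by_cases hv : v = n
    · subst hv
      rw [if_pos rfl, List.count_cons_self]
      push_cast
      ring
    · rw [if_neg hv, List.count_cons_of_ne (fun h => hv h.symm)]

lemma setfold_getD (s : List Int) (b : PySem.Dict Int Int) (w v : Int) (hs : s.Nodup) :
    (s.foldl (fun b n => b.insert n (b.getD n 0 + w)) b).getD v 0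
      = b.getD v 0 + (if v ∈ s then w else 0) := by
  induction s generalizing b with
  | nil => simp
  | cons n t ih =>
    have hn : n ∉ t := (List.nodup_cons.mp hs).1
    simp only [List.foldl_cons]
    rw [ih (b.insert n (b.getD n 0 + w)) (List.nodup_cons.mp hs).2, PySem.Dict.getD_insert]
    by_cases hv : v = n
    · subst hv
      rw [if_pos rfl]
      simp [hn]
    · rw [if_neg hv]
      simp [List.mem_cons, hv]

lemma base_getD (l : List (List Int × Int)) (b : PySem.Dict Int Int) (v : Int) :
    (l.foldl (fun b p =>
        (PySem.Set.ofList p.1).foldl (fun b n =>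
          b.insert n (b.getD n 0 + (1 + (p.2 - 1) * ((p.1.length : Int) - 1)))) b) b).getD v 0
      = b.getD v 0 + ((l.filter (fun p => decide (v ∈ p.1))).map (fun p => pvg p.1 p.2)).sum := by
  induction l generalizing b with
  | nil => simp
  | cons p t ih =>
    simp only [List.foldl_cons]
    rw [ih, setfold_getD _ _ _ _ (PySem.Set.nodup_ofList p.1)]
    by_cases hm : v ∈ p.1
    · rw [if_pos ((PySem.Set.mem_ofList p.1 v).mpr hm)]
      simp only [List.filter_cons, hm, decide_true, if_pos, List.map_cons, List.sum_cons, pvg]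
      ring
    · rw [if_neg (fun hh => hm ((PySem.Set.mem_ofList p.1 v).mp hh))]
      simp only [List.filter_cons, hm, decide_false, add_zero]
      simp

lemma insertBy_congr {α : Type} (p q : α → α → Bool) (x : α) (acc : List α)
    (h : ∀ y ∈ acc, p x y = q x y) : PySem.List.insertBy p x acc = PySem.List.insertBy q x acc := by
  induction acc with
  | nil => rfl
  | cons y ys ih =>
    simp only [PySem.List.insertBy]
    rw [h y (by simp)]
    by_cases hq : q x y = true
    · simp [hq]
    · simp only [Bool.not_eq_true] at hq
      simp only [hq, Bool.false_eq_true, if_false, List.cons.injEq, true_and]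
      exact ih (fun z hz => h z (by simp [hz]))

lemma insertBy_perm {α : Type} (before : α → α → Bool) (x : α) (ys : List α) :
    (PySem.List.insertBy before x ys).Perm (x :: ys) := by
  induction ys with
  | nil => simp [PySem.List.insertBy]
  | cons y t ih =>
    simp only [PySem.List.insertBy]
    by_cases hb : before x y = true
    · simp [hb]
    · simp only [Bool.not_eq_true] at hb
      simp only [hb, Bool.false_eq_true, if_false]
      exact (ih.cons y).trans (List.Perm.swap x y t)

lemma fold2_congr (xs : List (Int × Int)) : ∀ (acc : List (Int × Int)),
    ((xs ++ acc).map Prod.fst).Nodup →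
    xs.foldl (fun acc x => PySem.List.insertBy
        (fun a b => decide (a.1 < b.1) || (!decide (b.1 < a.1) && decide (a.2 < b.2))) x acc) acc
      = xs.foldl (fun acc x => PySem.List.insertBy (fun a b => decide (a.1 < b.1)) x acc) acc := by
  induction xs with
  | nil => intro acc _; rfl
  | cons x t ih =>
    intro acc h
    have hx : ∀ y ∈ acc, x.1 ≠ y.1 := by
      intro y hy heq
      have hnotin : x.1 ∉ (t ++ acc).map Prod.fst := by
        have h2 := h
        simp only [List.cons_append, List.map_cons, List.nodup_cons] at h2
        exact h2.1
      apply hnotin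
      rw [List.map_append]
      exact List.mem_append_right _ (by rw [heq]; exact List.mem_map_of_mem hy)
    simp only [List.foldl_cons]
    have hpt : ∀ y ∈ acc,
        (decide (x.1 < y.1) || (!decide (y.1 < x.1) && decide (x.2 < y.2)))
          = decide (x.1 < y.1) := by
      intro y hy
      by_cases hlt : x.1 < y.1
      · simp [hlt]
      · have hgt : y.1 < x.1 := lt_of_le_of_ne (not_lt.mp hlt) (fun e => hx y hy e.symm)
        simp [hlt, hgt]
    rw [insertBy_congr
      (fun a b : ℤ × ℤ => decide (a.1 < b.1) || (!decide (b.1 < a.1) && decide (a.2 < b.2)))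
      (fun a b : ℤ × ℤ => decide (a.1 < b.1)) x acc hpt]
    apply ih
    have hp1 : (PySem.List.insertBy (fun a b : ℤ × ℤ => decide (a.1 < b.1)) x acc).Perm (x :: acc) :=
      insertBy_perm _ x acc
    have hp2 : (t ++ PySem.List.insertBy (fun a b : ℤ × ℤ => decide (a.1 < b.1)) x acc).Perm
        (x :: (t ++ acc)) := (List.Perm.append_left t hp1).trans List.perm_middle
    exact ((hp2.map Prod.fst).symm.nodup) h

-- with pairwise-distinct first components the secondary sort key is irrelevant
lemma sorted2_eq_sorted (l : List (Int × Int)) (hnd : (l.map Prod.fst).Nodup) :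
    PySem.List.sorted2 l (fun p => p.1) (fun p => p.2) false
      = PySem.List.sorted l (fun p => p.1) false := by
  rw [PySem.List.sorted_eq_foldl_insertBy]
  exact fold2_congr l [] (by simpa using hnd)

lemma group_step_eq :
    (fun (g : PySem.Dict Int (List Int)) (p : Int × Int) =>
      match g.get? p.2 with
      | some l => g.insert p.2 (l ++ [p.1])
      | none => g.insert p.2 [p.1])
    = fun (g : PySem.Dict Int (List Int)) (p : Int × Int) => g.insert p.2 (g.getD p.2 [] ++ [p.1]) := by
  funext g p
  cases hg : g.get? p.2 <;> simp [PySem.Dict.getD_eq_get?_getD, hg]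

lemma pvS_map (l : List (List Int × Int)) (n : Int) :
    pvS (l.map (fun p => (p.1, pvg p.1 p.2))) n
      = ((l.filter (fun p => decide (n ∈ p.1))).map (fun p => pvg p.1 p.2)).sum := by
  simp [pvS, List.filter_map, List.map_map, Function.comp_def]

lemma ns_items_eq (hyperlinks : List (List Int)) (nodes : List Int) :
    (nodes.foldl (fun d n =>
        (hyperlinks.foldl (fun d h =>
            match d.get? (PySem.List.sorted h (fun x => x) false) with
            | some w => d.insert (PySem.List.sorted h (fun x => x) false) (w + ((h.length : Int) - 1))
            | none => d.insert (PySem.List.sorted h (fun x => x) false) 1) PySem.Dict.empty).items.foldl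
          (fun d p => if n ∈ p.1 then d.insert n (d.getD n 0 + p.2) else d) d)
      (nodes.foldl (fun d n => d.insert n 0) PySem.Dict.empty)).items
    = (nodes.foldl (fun d n => d.insert n (d.getD n 0 + 1)) PySem.Dict.empty).items.map
        (fun p => (p.1, p.2 * ((hyperlinks.foldl (fun d h =>
            d.insert (PySem.List.sorted h (fun x => x) false)
              (d.getD (PySem.List.sorted h (fun x => x) false) 0 + 1)) PySem.Dict.empty).items.foldl
          (fun b p => (PySem.Set.ofList p.1).foldl (fun b n =>
            b.insert n (b.getD n 0 + (1 + (p.2 - 1) * ((p.1.length : Int) - 1)))) b) PySem.Dict.empty).getD p.1 0)) := by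
  have hw := wbh_eq hyperlinks PySem.Dict.empty
  rw [show (PySem.Dict.mk ((PySem.Dict.empty : PySem.Dict (List Int) Int).items.map
      (fun p => (p.1, pvg p.1 p.2)))) = (PySem.Dict.empty : PySem.Dict (List Int) Int) from rfl] at hw
  rw [hw]
  have hkeys0 : (nodes.foldl (fun d n => d.insert n (0 : Int)) PySem.Dict.empty).keys
      = PySem.Set.ofList nodes := by
    have h := PySem.Dict.keys_foldl_insert (ν := Int) nodes (fun _ _ => 0) PySem.Dict.empty
    rw [h, PySem.Dict.keys_empty, PySem.Set.ofList_eq_foldl]; rfl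
  have hnd0 : (nodes.foldl (fun d n => d.insert n (0 : Int)) PySem.Dict.empty).keys.Nodup :=
    PySem.Dict.nodup_keys_foldl_insert nodes (fun _ _ => 0) PySem.Dict.empty PySem.Dict.nodup_keys_empty
  have hg0 : ∀ v, (nodes.foldl (fun d n => d.insert n (0 : Int)) PySem.Dict.empty).getD v 0 = 0 :=
    fun v => ns0_getD nodes PySem.Dict.empty (fun u => PySem.Dict.getD_empty u 0) v
  obtain ⟨hk, hg⟩ := outer_char nodes
    (PySem.Dict.mk ((hyperlinks.foldl (fun d h =>
        d.insert (PySem.List.sorted h (fun x => x) false)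
          (d.getD (PySem.List.sorted h (fun x => x) false) 0 + 1)) PySem.Dict.empty).items.map
      (fun p => (p.1, pvg p.1 p.2)))).items
    (nodes.foldl (fun d n => d.insert n (0 : Int)) PySem.Dict.empty) hnd0
    (fun v hv => by
      rw [PySem.Dict.contains_eq_decide_mem_keys, hkeys0]
      simp [PySem.Set.mem_ofList, hv])
  rw [PySem.Dict.items_eq_map_keys _ (by rw [hk]; exact hnd0) 0]
  rw [PySem.Dict.foldl_insert_getD_add_one_eq_counter nodes, PySem.Dict.items_counter nodes]
  rw [hk, hkeys0, List.map_map]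
  apply List.map_congr_left
  intro n hn
  simp only [Function.comp_def]
  refine Prod.ext rfl ?_
  show (_ : Int) = _
  rw [hg n, hg0 n, base_getD, PySem.Dict.getD_empty]
  have hps := pvS_map ((hyperlinks.foldl (fun d h =>
      d.insert (PySem.List.sorted h (fun x => x) false)
        (d.getD (PySem.List.sorted h (fun x => x) false) 0 + 1)) PySem.Dict.empty).items) n
  rw [show (PySem.Dict.mk ((hyperlinks.foldl (fun d h =>
      d.insert (PySem.List.sorted h (fun x => x) false)
        (d.getD (PySem.List.sorted h (fun x => x) false) 0 + 1)) PySem.Dict.empty).items.map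
      (fun p => (p.1, pvg p.1 p.2)))).items
    = ((hyperlinks.foldl (fun d h =>
      d.insert (PySem.List.sorted h (fun x => x) false)
        (d.getD (PySem.List.sorted h (fun x => x) false) 0 + 1)) PySem.Dict.empty).items.map
      (fun p => (p.1, pvg p.1 p.2))) from rfl, hps]
  simp [pvg]

-- the grouping fold's lookups: nodes appended in traversal order, per strength
lemma grp_getD (M : List (Int × Int)) (g : PySem.Dict Int (List Int)) (s : Int) :
    (M.foldl (fun g p => g.insert p.2 (g.getD p.2 [] ++ [p.1])) g).getD s []
      = g.getD s [] ++ (M.filter (fun p => p.2 == s)).map Prod.fst := by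
  induction M generalizing g with
  | nil => simp
  | cons p t ih =>
    simp only [List.foldl_cons, List.filter_cons]
    by_cases hp : p.2 = s
    · rw [ih, PySem.Dict.getD_insert, if_pos hp.symm, hp]
      simp
    · rw [ih, PySem.Dict.getD_insert, if_neg (fun h => hp h.symm)]
      simp [hp]

-- the grouping fold's items, closed form: one entry per distinct strength, in first-occurrence order
lemma grp_items (M : List (Int × Int)) :
    (M.foldl (fun g p => g.insert p.2 (g.getD p.2 [] ++ [p.1])) PySem.Dict.empty).items
      = (PySem.Set.ofList (M.map (fun p => p.2))).map
          (fun s => (s, (M.filter (fun p => p.2 == s)).map Prod.fst)) := by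
  have hkeys : (M.foldl (fun g p => g.insert p.2 (g.getD p.2 [] ++ [p.1])) PySem.Dict.empty).keys
      = PySem.Set.ofList (M.map (fun p => p.2)) := by
    have h := PySem.Dict.keys_foldl_insert_key M (fun p => p.2)
      (fun g p => g.getD p.2 [] ++ [p.1]) PySem.Dict.empty
    rw [h, PySem.Dict.keys_empty, PySem.Set.ofList_eq_foldl]; rfl
  have hnd : (M.foldl (fun g p => g.insert p.2 (g.getD p.2 [] ++ [p.1])) PySem.Dict.empty).keys.Nodup := by
    rw [hkeys]; exact PySem.Set.nodup_ofList _
  rw [PySem.Dict.items_eq_map_keys _ hnd [], hkeys]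
  apply List.map_congr_left
  intro s _
  rw [grp_getD, PySem.Dict.getD_empty]
  simp

-- promotes pairwise ≤ on first components to pairwise < when they are nodup
lemma pairwise_lt_of_le_nodup (m : List (Int × Int)) (hle : m.Pairwise (fun a b => a.1 ≤ b.1))
    (hm : (m.map Prod.fst).Nodup) : m.Pairwise (fun a b => a.1 < b.1) := by
  have hne : m.Pairwise (fun a b => a.1 ≠ b.1) := List.pairwise_map.mp hm
  exact (hle.and hne).imp (fun h => lt_of_le_of_ne h.1 h.2)

-- filtering the fst-sorted list and projecting = sorting the projected filter
lemma filtmap_sorted (L : List (Int × Int)) (hnd : (L.map Prod.fst).Nodup) (s : Int) :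
    ((PySem.List.sorted L (fun p => p.1) false).filter (fun p => p.2 == s)).map Prod.fst
      = PySem.List.sorted ((L.filter (fun p => p.2 == s)).map Prod.fst) (fun n => n) false := by
  symm
  apply PySem.List.sorted_eq_of_perm_of_pairwise_lt
  · exact ((PySem.List.sorted_perm L (fun p => p.1) false).filter _).map Prod.fst
  · have hM : (PySem.List.sorted L (fun p => p.1) false).Pairwise (fun a b => a.1 ≤ b.1) :=
      PySem.List.sorted_pairwise L (fun p => p.1)
    have hndM : ((PySem.List.sorted L (fun p => p.1) false).map Prod.fst).Nodup :=
      (((PySem.List.sorted_perm L (fun p => p.1) false).map Prod.fst).nodup_iff).mpr hnd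
    have hsub : ((PySem.List.sorted L (fun p => p.1) false).filter (fun p => p.2 == s)).Sublist
        (PySem.List.sorted L (fun p => p.1) false) := List.filter_sublist
    have hndF : (((PySem.List.sorted L (fun p => p.1) false).filter (fun p => p.2 == s)).map Prod.fst).Nodup :=
      (hsub.map Prod.fst).nodup hndM
    have hlt := pairwise_lt_of_le_nodup _ (hM.sublist hsub) hndF
    exact List.pairwise_map.mpr hlt

-- A's tail (sort by strength desc, re-sort, group via a dict, sort keys desc) equals B's tail
-- (distinct strengths desc, each paired with its ascending node list), given nodup node keys
lemma tail_eq2 (L : List (Int × Int)) (hnd : (L.map Prod.fst).Nodup) :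
    PySem.List.sorted
      ((PySem.List.sorted2 (PySem.List.sorted L (fun p => p.2) true) (fun p => p.1) (fun p => p.2) false).foldl
        (fun g p => g.insert p.2 (g.getD p.2 [] ++ [p.1])) PySem.Dict.empty).items
      (fun p => p.1) true
    = (PySem.List.sorted (PySem.Set.ofList (L.map (fun p => p.2))) (fun s => s) true).map
        (fun s => (s, PySem.List.sorted ((L.filter (fun p => p.2 == s)).map (fun p => p.1)) (fun n => n) false)) := by
  have hperm0 : (PySem.List.sorted L (fun p => p.2) true).Perm L := PySem.List.sorted_perm L _ true
  have hnd' : ((PySem.List.sorted L (fun p => p.2) true).map Prod.fst).Nodup :=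
    ((hperm0.map Prod.fst).nodup_iff).mpr hnd
  rw [sorted2_eq_sorted _ hnd']
  set M := PySem.List.sorted (PySem.List.sorted L (fun p => p.2) true) (fun p => p.1) false with hM
  have hMperm : M.Perm L := (PySem.List.sorted_perm _ _ false).trans hperm0
  rw [grp_items]
  -- the grouped items, with values rewritten to B's form
  have hval : ∀ s : Int, (M.filter (fun p => p.2 == s)).map Prod.fst
      = PySem.List.sorted ((L.filter (fun p => p.2 == s)).map Prod.fst) (fun n => n) false := by
    intro s
    have h1 := filtmap_sorted (PySem.List.sorted L (fun p => p.2) true) hnd' s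
    rw [← hM] at h1
    rw [h1]
    apply PySem.List.sorted_eq_sorted_of_perm _ _ _ (fun a b h => h)
    exact (hperm0.filter _).map Prod.fst
  have hitems : (PySem.Set.ofList (M.map (fun p => p.2))).map
        (fun s => (s, (M.filter (fun p => p.2 == s)).map Prod.fst))
      = (PySem.Set.ofList (M.map (fun p => p.2))).map
        (fun s => (s, PySem.List.sorted ((L.filter (fun p => p.2 == s)).map (fun p => p.1)) (fun n => n) false)) :=
    List.map_congr_left (fun s _ => by rw [hval s])
  rw [hitems]
  -- now both sides map the same function over perm-equal nodup key lists; B's is sorted desc strictly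
  apply PySem.List.sorted_rev_eq_of_perm_of_pairwise_gt
  · apply List.Perm.map
    apply (PySem.List.sorted_perm _ _ true).trans
    apply (List.perm_ext_iff_of_nodup (PySem.Set.nodup_ofList _) (PySem.Set.nodup_ofList _)).mpr
    intro s
    rw [PySem.Set.mem_ofList, PySem.Set.mem_ofList]
    exact List.Perm.mem_iff (hMperm.map _).symm
  · have hks : (PySem.List.sorted (PySem.Set.ofList (L.map (fun p => p.2))) (fun s => s) true).Pairwise
        (fun a b => b ≤ a) := PySem.List.sorted_pairwise_rev _ _
    have hknd : (PySem.List.sorted (PySem.Set.ofList (L.map (fun p => p.2))) (fun s => s) true).Nodup :=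
      ((PySem.List.sorted_perm _ _ true).nodup_iff).mpr (PySem.Set.nodup_ofList _)
    have hlt : (PySem.List.sorted (PySem.Set.ofList (L.map (fun p => p.2))) (fun s => s) true).Pairwise
        (fun a b => b < a) := by
      exact (hks.and hknd).imp (fun h => lt_of_le_of_ne h.1 (Ne.symm h.2))
    exact List.pairwise_map.mpr hlt

-- ===== VERDICT (by name: the statement is the Claim_ definition above) =====
theorem calculate_nodes_by_weight_spec : Claim_equal_calculate_nodes_by_weight := by
  intro hyperlinks nodes _
  unfold Spec_calculate_nodes_by_weight calculate_nodes_by_weight calculate_nodes_by_weight_alt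
  dsimp only
  rw [List.foldl_map, group_step_eq, ns_items_eq hyperlinks nodes]
  apply tail_eq2
  rw [PySem.Dict.foldl_insert_getD_add_one_eq_counter nodes, PySem.Dict.items_counter nodes]
  simp [List.map_map, Function.comp_def, PySem.Set.nodup_ofList]
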